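-- pv_equiv track=rewrite | github.com/jummsa/BeeCrowd | 1239 - Atalhos Bloggo.py | processar_atalhos
-- ===== SOURCE A (Python) =====
-- def processar_atalhos(texto):
--     resultado = ""
--     italico_aberto = False
--     negrito_aberto = False
--
--     for char in texto:
--         if char == "_":
--             # Alterna entre abrir e fechar a tag <i>
--             if italico_aberto:
--                 resultado += "</i>"
--             else:
--                 resultado += "<i>"
--             italico_aberto = not italico_aberto
--         elif char == "*":
--             # Alterna entre abrir e fechar a tag <b>
--             if negrito_aberto:
--                 resultado += "</b>"
--             else:
--                 resultado += "<b>"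
--             negrito_aberto = not negrito_aberto
--         else:
--             # Adiciona o caractere normal ao resultado
--             resultado += char
--
--     return resultado
-- ===== SOURCE B (Python) =====
-- def toggle(s, marker, open_tag, close_tag):
--     """Replace each occurrence of marker in s with alternating open/close tags."""
--     out = []
--     opened = False
--     for ch in s:
--         if ch == marker:
--             out.append(close_tag if opened else open_tag)
--             opened = not opened
--         else:
--             out.append(ch)
--     return "".join(out)
--
-- def processar_atalhos(texto):
--     return toggle(toggle(texto, "_", "<i>", "</i>"), "*", "<b>", "</b>")
-- ===== Notes on version B (the rewrite author's own statement) =====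
-- stated objective: alternative
-- what changed: Replaces the single combined pass with two booleans by a generic toggle(s, marker, open_tag, close_tag) helper applied in two independent passes, one for '_' and one for '*'.
import Mathlib
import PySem

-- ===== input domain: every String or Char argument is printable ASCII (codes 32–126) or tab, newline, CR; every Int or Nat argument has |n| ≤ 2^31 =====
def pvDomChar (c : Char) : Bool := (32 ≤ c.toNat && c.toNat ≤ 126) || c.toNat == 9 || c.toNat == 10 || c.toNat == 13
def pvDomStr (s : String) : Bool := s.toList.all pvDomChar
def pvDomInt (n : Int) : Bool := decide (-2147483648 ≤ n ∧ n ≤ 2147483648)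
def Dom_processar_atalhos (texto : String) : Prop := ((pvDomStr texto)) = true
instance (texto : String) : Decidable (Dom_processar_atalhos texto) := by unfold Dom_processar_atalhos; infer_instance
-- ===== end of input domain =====

-- B replaces A's single combined pass (two booleans) by a generic toggle helper run in two
-- independent passes, one per marker; same cost, different decomposition.

-- ===== PORT A =====
-- A's loop: accumulator string (as List Char) plus the two flags, one step per character.
def pvStepA (st : List Char × Bool × Bool) (c : Char) : List Char × Bool × Bool :=
  if c = '_' then
    (st.1 ++ (if st.2.1 then ['<', '/', 'i', '>'] else ['<', 'i', '>']), !st.2.1, st.2.2)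
  else if c = '*' then
    (st.1 ++ (if st.2.2 then ['<', '/', 'b', '>'] else ['<', 'b', '>']), st.2.1, !st.2.2)
  else
    (st.1 ++ [c], st.2.1, st.2.2)

def processar_atalhos (texto : String) : String :=
  String.mk (texto.toList.foldl pvStepA ([], false, false)).1

-- ===== PORT B =====
-- Source B's toggle: one scan, replacing marker with alternating open/close tags.
def pvToggle (s : List Char) (marker : Char) (openT closeT : List Char) (opened : Bool) : List Char :=
  match s with
  | [] => []
  | c :: rest =>
      if c = marker then (if opened then closeT else openT) ++ pvToggle rest marker openT closeT (!opened)
      else c :: pvToggle rest marker openT closeT opened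

def processar_atalhos_alt (texto : String) : String :=
  String.mk (pvToggle (pvToggle texto.toList '_' ['<', 'i', '>'] ['<', '/', 'i', '>'] false)
    '*' ['<', 'b', '>'] ['<', '/', 'b', '>'] false)

-- ===== PRECONDITION & SPEC =====
def Spec_processar_atalhos (texto : String) (out : String) : Prop := out = processar_atalhos_alt texto
instance (texto : String) (out : String) : Decidable (Spec_processar_atalhos texto out) := by unfold Spec_processar_atalhos; infer_instance

-- ===== CLAIM (what is proved, stated in full; the proofs are below) =====
def Claim_equal_processar_atalhos : Prop := ∀ (texto : String), Dom_processar_atalhos texto → Spec_processar_atalhos texto (processar_atalhos texto)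

-- ===== LEMMAS AND PROOFS =====

-- the '*'-pass leaves the italic tags alone (they contain no '*') and passes ordinary chars through
theorem pvToggle_append_noMarker (pre s : List Char) (marker : Char) (openT closeT : List Char)
    (opened : Bool) (h : marker ∉ pre) :
    pvToggle (pre ++ s) marker openT closeT opened = pre ++ pvToggle s marker openT closeT opened := by
  induction pre with
  | nil => rfl
  | cons c cs ih =>
      simp only [List.mem_cons, not_or] at h
      simp [pvToggle, Ne.symm h.1, ih h.2]

-- loop invariant: A's fold from (acc, i, b) equals acc ++ the two toggle passes started at flags i, b
theorem pvFold_eq_toggles (s : List Char) (acc : List Char) (i b : Bool) :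
    (s.foldl pvStepA (acc, i, b)).1 =
      acc ++ pvToggle (pvToggle s '_' ['<', 'i', '>'] ['<', '/', 'i', '>'] i)
        '*' ['<', 'b', '>'] ['<', '/', 'b', '>'] b := by
  induction s generalizing acc i b with
  | nil => simp [pvToggle]
  | cons c rest ih =>
      by_cases h_ : c = '_'
      · subst h_
        have htag : pvToggle ((if i then ['<', '/', 'i', '>'] else ['<', 'i', '>']) ++
            pvToggle rest '_' ['<', 'i', '>'] ['<', '/', 'i', '>'] (!i))
            '*' ['<', 'b', '>'] ['<', '/', 'b', '>'] b =
            (if i then ['<', '/', 'i', '>'] else ['<', 'i', '>']) ++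
            pvToggle (pvToggle rest '_' ['<', 'i', '>'] ['<', '/', 'i', '>'] (!i))
              '*' ['<', 'b', '>'] ['<', '/', 'b', '>'] b := by
          apply pvToggle_append_noMarker
          cases i <;> decide
        simp [List.foldl_cons, pvStepA, pvToggle, ih, htag]
      · by_cases hs : c = '*'
        · subst hs
          simp [List.foldl_cons, pvStepA, pvToggle, ih]
        · simp [List.foldl_cons, pvStepA, h_, hs, pvToggle, ih]

-- ===== VERDICT (by name: the statement is the Claim_ definition above) =====
theorem processar_atalhos_spec : Claim_equal_processar_atalhos := by
  intro texto _
  show _ = _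
  unfold processar_atalhos processar_atalhos_alt
  rw [pvFold_eq_toggles]
  simp
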